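-- pv_equiv track=rewrite | github.com/catboost/catboost | build/scripts/build_info_gen.py | filterflags
-- ===== SOURCE A (Python) =====
-- def filterflags(flags_str):
--     badflgs = {
--         '-fdebug-prefix-map',
--         '-DARCADIA_ROOT',
--         '-DARCADIA_BUILD_ROOT',
--         '/DARCADIA_ROOT',
--         '/DARCADIA_BUILD_ROOT',
--     }
--
--     def flags_iter():
--         for flag in flags_str.split():
--             if not flag:
--                 continue
--             if flag.split('=', 1)[0] in badflgs:
--                 continue
--             yield flag
--
--     return ' '.join(flags_iter())
-- ===== SOURCE B (Python) =====
-- def filterflags(flags_str):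
--     badflgs = (
--         '-fdebug-prefix-map',
--         '-DARCADIA_ROOT',
--         '-DARCADIA_BUILD_ROOT',
--         '/DARCADIA_ROOT',
--         '/DARCADIA_BUILD_ROOT',
--     )
--     out = ''
--     i, n = 0, len(flags_str)
--     while i < n:
--         if flags_str[i].isspace():
--             i += 1
--             continue
--         j = i + 1
--         while j < n and not flags_str[j].isspace():
--             j += 1
--         tok = flags_str[i:j]
--         if tok.partition('=')[0] not in badflgs:
--             out = tok if not out else out + ' ' + tok
--         i = j
--     return out
-- ===== Notes on version B (the rewrite author's own statement) =====
-- stated objective: alternative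
-- what changed: A splits the string into a token list, filters it through a generator whose test splits each token and looks the head up in a set, then joins the survivors; B is a single character-level scan with two index pointers that extracts each whitespace-delimited token in place and appends the kept ones directly to an output-string accumulator (no split, no intermediate list, no join), taking the flag head with str.partition.
import Mathlib
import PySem

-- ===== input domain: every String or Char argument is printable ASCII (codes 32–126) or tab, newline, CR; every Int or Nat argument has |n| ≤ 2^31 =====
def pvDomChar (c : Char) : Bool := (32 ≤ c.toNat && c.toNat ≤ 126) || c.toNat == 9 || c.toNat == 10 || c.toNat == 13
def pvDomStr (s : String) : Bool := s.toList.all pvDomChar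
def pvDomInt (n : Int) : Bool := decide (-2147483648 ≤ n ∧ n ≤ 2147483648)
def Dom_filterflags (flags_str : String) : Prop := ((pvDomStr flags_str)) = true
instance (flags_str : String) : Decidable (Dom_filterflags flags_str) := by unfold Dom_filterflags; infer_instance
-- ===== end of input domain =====

-- B replaces A's split()/generator-filter/join pipeline by a single character-level scan with
-- two index pointers that appends each kept token to an explicit output-string accumulator
-- (no intermediate token list, no join); same O(n) cost, a different decomposition.

-- ===== PORT A =====
def pvBadSet : PySem.Set String :=
  PySem.Set.ofList ["-fdebug-prefix-map", "-DARCADIA_ROOT", "-DARCADIA_BUILD_ROOT",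
    "/DARCADIA_ROOT", "/DARCADIA_BUILD_ROOT"]

def filterflags (flags_str : String) : String :=
  PySem.Str.join " " ((PySem.Str.split₀ flags_str).filter (fun flag =>
    if flag = "" then false
    else if pvBadSet.contains
        (PySem.List.pyGetD ((PySem.Str.splitMax? flag "=" 1).getD []) 0 "") then false
    else true))

-- ===== PORT B =====
def pvBadList : List String :=
  ["-fdebug-prefix-map", "-DARCADIA_ROOT", "-DARCADIA_BUILD_ROOT",
    "/DARCADIA_ROOT", "/DARCADIA_BUILD_ROOT"]

-- tok.partition('=')[0] ported exactly: the maximal '='-free prefix of the token.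
def pvBadTok (t : List Char) : Bool :=
  pvBadList.contains (String.ofList (t.takeWhile (· ≠ '=')))

-- The two while-loops of Source B over the character sequence: skip a space, or grab the
-- maximal nonspace run (the j-scan) as the token and append it to the accumulator.
def pvScan : List Char → List Char → List Char
  | [], out => out
  | c :: cs, out =>
    if PySem.Chars.isspace c then pvScan cs out
    else
      pvScan (cs.dropWhile (fun d => !PySem.Chars.isspace d))
        (if pvBadTok (c :: cs.takeWhile (fun d => !PySem.Chars.isspace d)) then out
         else if out.isEmpty then c :: cs.takeWhile (fun d => !PySem.Chars.isspace d)
         else out ++ ' ' :: (c :: cs.takeWhile (fun d => !PySem.Chars.isspace d)))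
  termination_by cs _ => cs.length
  decreasing_by
  · simp
  · simpa using Nat.lt_succ_of_le (List.length_dropWhile_le _ _)

def filterflags_alt (flags_str : String) : String :=
  String.ofList (pvScan flags_str.toList [])

-- ===== PRECONDITION & SPEC =====
def Spec_filterflags (flags_str : String) (out : String) : Prop := out = filterflags_alt flags_str
instance (flags_str : String) (out : String) : Decidable (Spec_filterflags flags_str out) := by unfold Spec_filterflags; infer_instance

-- ===== CLAIM =====
def Claim_equal_filterflags : Prop := ∀ (flags_str : String), Dom_filterflags flags_str → Spec_filterflags flags_str (filterflags flags_str)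

-- ===== LEMMAS AND PROOFS =====

-- The whitespace tokens of a character list (proof-side characterisation of str.split()).
def pvTokens : List Char → List (List Char)
  | [] => []
  | c :: cs =>
    if PySem.Chars.isspace c then pvTokens cs
    else (c :: cs.takeWhile (fun d => !PySem.Chars.isspace d)) ::
      pvTokens (cs.dropWhile (fun d => !PySem.Chars.isspace d))
  termination_by cs => cs.length
  decreasing_by
  · simp
  · simpa using Nat.lt_succ_of_le (List.length_dropWhile_le _ _)

-- The reference join that pvScan's accumulator implements.
def pvJoin : List Char → List (List Char) → List Char
  | out, [] => out
  | out, t :: ts => pvJoin (if out.isEmpty then t else out ++ ' ' :: t) ts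

theorem split₀go_eq_tokens : ∀ (cs cur : List Char) (acc : List (List Char)),
    PySem.Chars.split₀.go cs cur acc =
      acc.reverse ++ (if cur.isEmpty then pvTokens cs
        else (cur.reverse ++ cs.takeWhile (fun d => !PySem.Chars.isspace d)) ::
          pvTokens (cs.dropWhile (fun d => !PySem.Chars.isspace d))) := by
  intro cs
  induction cs with
  | nil =>
    intro cur acc
    by_cases hc : cur.isEmpty <;> simp [PySem.Chars.split₀.go, hc, pvTokens]
  | cons c rest ih =>
    intro cur acc
    by_cases hs : PySem.Chars.isspace c
    · by_cases hc : cur.isEmpty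
      · rw [show PySem.Chars.split₀.go (c :: rest) cur acc = PySem.Chars.split₀.go rest [] acc by
            simp [PySem.Chars.split₀.go, hs, hc]]
        rw [ih]
        simp [hc, pvTokens, hs]
      · rw [show PySem.Chars.split₀.go (c :: rest) cur acc
              = PySem.Chars.split₀.go rest [] (cur.reverse :: acc) by
            simp [PySem.Chars.split₀.go, hs, hc]]
        rw [ih]
        simp [hc, pvTokens, hs]
    · rw [show PySem.Chars.split₀.go (c :: rest) cur acc
            = PySem.Chars.split₀.go rest (c :: cur) acc by
          simp [PySem.Chars.split₀.go, hs]]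
      rw [ih]
      by_cases hc : cur.isEmpty
      · have : cur = [] := by simpa [List.isEmpty_iff] using hc
        subst this
        simp [pvTokens, hs]
      · simp [hc, hs]

theorem split₀_eq_tokens (cs : List Char) : PySem.Chars.split₀ cs = pvTokens cs := by
  rw [PySem.Chars.split₀, split₀go_eq_tokens]
  simp

theorem tokens_ne_nil (cs : List Char) : ∀ t ∈ pvTokens cs, t ≠ [] := by
  induction cs using pvTokens.induct with
  | case1 => simp [pvTokens]
  | case2 c cs hs ih => simpa [pvTokens, hs] using ih
  | case3 c cs hs ih =>
    intro t ht
    rw [pvTokens, if_neg hs] at ht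
    rcases List.mem_cons.mp ht with h | h
    · simp [h]
    · exact ih t h

-- splitOnMax.go with maxsplit 0 returns immediately with the rest as the last piece.
theorem splitgo_zero (fuel : Nat) (l cur : List Char) (acc : List (List Char)) :
    PySem.Chars.splitOnMax.go ['='] fuel 0 l cur acc = acc.reverse ++ [cur.reverse ++ l] := by
  cases fuel with
  | zero => simp [PySem.Chars.splitOnMax.go]
  | succ f => cases l with
    | nil => simp [PySem.Chars.splitOnMax.go]
    | cons c rest => simp [PySem.Chars.splitOnMax.go]

-- splitOnMax.go with maxsplit 1: the first piece is everything before the first '='.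
theorem splitgo_one (fuel : Nat) (l cur : List Char) (acc : List (List Char))
    (h : l.length < fuel) :
    PySem.Chars.splitOnMax.go ['='] fuel 1 l cur acc =
      acc.reverse ++ (cur.reverse ++ l.takeWhile (· ≠ '=')) ::
        (if '=' ∈ l then [(l.dropWhile (· ≠ '=')).tail] else []) := by
  induction fuel generalizing l cur acc with
  | zero => omega
  | succ f ih =>
    cases l with
    | nil => simp [PySem.Chars.splitOnMax.go]
    | cons c rest =>
      by_cases hc : c = '='
      · subst hc
        simp [PySem.Chars.splitOnMax.go, splitgo_zero]
      · have : (['='].isPrefixOf (c :: rest)) = false := by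
          simp [List.isPrefixOf]; exact fun h => absurd h.symm hc
        simp only [PySem.Chars.splitOnMax.go, this]
        rw [if_neg (by omega : ¬ (1:Nat) = 0)]
        simp only [Bool.false_eq_true, if_false]
        rw [ih rest (c :: cur) acc (by simpa using Nat.lt_of_succ_lt_succ h)]
        simp [hc, eq_comm]

theorem ofList_eq_iff (t : List Char) (b : String) : (String.ofList t = b) ↔ t = b.toList := by
  constructor
  · intro h; simpa using congrArg String.toList h
  · intro h; subst h; exact String.ofList_toList ..

-- flag.split('=', 1)[0] is the '='-free prefix of the token.
theorem head_splitMax (t : List Char) :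
    PySem.List.pyGetD ((PySem.Str.splitMax? (String.ofList t) "=" 1).getD []) 0 ""
      = String.ofList (t.takeWhile (· ≠ '=')) := by
  have h1 : PySem.Str.splitMax? (String.ofList t) "=" 1
      = (PySem.Chars.splitMax? t ['='] 1).map (List.map String.ofList) := by
    simp [PySem.Str.splitMax?]
  have h2 : PySem.Chars.splitMax? t ['='] 1 = some (PySem.Chars.splitOnMax t ['='] 1) := by
    simp [PySem.Chars.splitMax?]
  have h3 : PySem.Chars.splitOnMax t ['='] 1
      = PySem.Chars.splitOnMax.go ['='] (t.length + 1) 1 t [] [] := by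
    simp [PySem.Chars.splitOnMax]
  rw [h1, h2, h3, splitgo_one _ _ _ _ (Nat.lt_succ_self _)]
  by_cases hm : '=' ∈ t <;> simp [hm, PySem.List.pyGetD_zero]

-- A's keep/skip decision coincides with B's on every nonempty token.
theorem token_key (t : List Char) (ht : t ≠ []) :
    (if String.ofList t = "" then false
     else if pvBadSet.contains
        (PySem.List.pyGetD ((PySem.Str.splitMax? (String.ofList t) "=" 1).getD []) 0 "") then false
     else true)
    = ! pvBadTok t := by
  rw [if_neg (fun h => ht (by simpa using (ofList_eq_iff t "").mp h))]
  rw [head_splitMax]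
  have hset : pvBadSet = pvBadList := by decide
  rw [hset, pvBadTok]
  cases h : pvBadList.contains (String.ofList (t.takeWhile (· ≠ '='))) <;> simp_all

-- pvScan = pvJoin of the kept tokens.
theorem scan_eq_join (cs out : List Char) :
    pvScan cs out = pvJoin out ((pvTokens cs).filter (fun t => ! pvBadTok t)) := by
  induction cs, out using pvScan.induct with
  | case1 out => simp [pvScan, pvTokens, pvJoin]
  | case2 c cs out hs ih =>
    rw [pvScan, if_pos hs, pvTokens, if_pos hs]
    exact ih
  | case3 c cs out hs ih =>
    rw [pvScan, if_neg hs, pvTokens, if_neg hs]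
    by_cases hb : pvBadTok (c :: cs.takeWhile (fun d => !PySem.Chars.isspace d))
    · simpa [hb, pvJoin] using ih
    · simpa [hb, pvJoin] using ih

theorem join_of_ne_nil : ∀ (ts : List (List Char)) (out : List Char), out ≠ [] →
    pvJoin out ts = out ++ (ts.map (' ' :: ·)).flatten := by
  intro ts
  induction ts with
  | nil => intro out _; simp [pvJoin]
  | cons t ts ih =>
    intro out hout
    rw [pvJoin, if_neg (by simpa [List.isEmpty_iff] using hout)]
    rw [ih _ (by simp)]
    simp

theorem intercalate_cons : ∀ (ts : List (List Char)) (t : List Char),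
    [' '].intercalate (t :: ts) = t ++ (ts.map (' ' :: ·)).flatten := by
  intro ts
  induction ts with
  | nil => intro t; simp [List.intercalate]
  | cons t2 ts ih =>
    intro t
    rw [List.intercalate, List.intersperse_cons₂]
    simp only [List.flatten_cons]
    have : (List.intersperse [' '] (t2 :: ts)).flatten = [' '].intercalate (t2 :: ts) := by
      simp [List.intercalate]
    rw [this, ih]
    simp

theorem join_eq_intercalate (ts : List (List Char)) (hts : ∀ t ∈ ts, t ≠ []) :
    pvJoin [] ts = [' '].intercalate ts := by
  cases ts with
  | nil => simp [pvJoin, List.intercalate]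
  | cons t ts =>
    rw [pvJoin, if_pos (by decide : ([] : List Char).isEmpty = true), intercalate_cons,
      join_of_ne_nil ts t (hts t (by simp))]

theorem main_eq (s : String) : filterflags s = filterflags_alt s := by
  unfold filterflags filterflags_alt
  rw [PySem.Str.split₀, split₀_eq_tokens, List.filter_map, PySem.Str.join]
  rw [scan_eq_join]
  have hfil : (pvTokens s.toList).filter
        ((fun flag =>
          if flag = "" then false
          else if pvBadSet.contains
              (PySem.List.pyGetD ((PySem.Str.splitMax? flag "=" 1).getD []) 0 "") then false
          else true) ∘ String.ofList)
      = (pvTokens s.toList).filter (fun t => ! pvBadTok t) := by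
    apply List.filter_congr
    intro t ht
    exact token_key t (tokens_ne_nil s.toList t ht)
  rw [hfil]
  congr 1
  rw [join_eq_intercalate _ (fun t ht => tokens_ne_nil s.toList t (List.mem_filter.mp ht).1)]
  have : (List.map String.toList (List.map String.ofList
      ((pvTokens s.toList).filter (fun t => ! pvBadTok t))))
      = (pvTokens s.toList).filter (fun t => ! pvBadTok t) := by
    rw [List.map_map]
    simp [Function.comp_def, String.toList_ofList]
  rw [this]
  simp [PySem.Chars.join]

-- ===== VERDICT =====
theorem filterflags_spec : Claim_equal_filterflags := by
  intro flags_str _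
  unfold Spec_filterflags
  exact main_eq flags_str
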